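-- pv_equiv track=rewrite | github.com/chandra88/docmaker | textManip.py | findFun
-- ===== SOURCE A (Python) =====
-- def findFun(st):
-- 	lines = st.split(' ')
-- 	word = ''
-- 	for line in lines:
-- 		if(line.find('(') >= 0):
-- 			word = line
-- 			break
--
-- 	words = word.split('(')
-- 	if('ClassDef' in words[0]): return ''
-- 	return words[0]
-- ===== SOURCE B (Python) =====
-- def findFun(st):
-- 	cur = []
-- 	for ch in st:
-- 		if ch == '(':
-- 			prefix = ''.join(cur)
-- 			return '' if 'ClassDef' in prefix else prefix
-- 		if ch == ' ':
-- 			cur = []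
-- 		else:
-- 			cur.append(ch)
-- 	return ''
-- ===== Notes on version B (the rewrite author's own statement) =====
-- stated objective: alternative
-- what changed: Replaced split-into-token-list + loop-over-tokens + second split with a single left-to-right character scan that keeps the characters seen since the last space and returns at the first open parenthesis; one pass, no intermediate token lists.
import Mathlib
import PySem

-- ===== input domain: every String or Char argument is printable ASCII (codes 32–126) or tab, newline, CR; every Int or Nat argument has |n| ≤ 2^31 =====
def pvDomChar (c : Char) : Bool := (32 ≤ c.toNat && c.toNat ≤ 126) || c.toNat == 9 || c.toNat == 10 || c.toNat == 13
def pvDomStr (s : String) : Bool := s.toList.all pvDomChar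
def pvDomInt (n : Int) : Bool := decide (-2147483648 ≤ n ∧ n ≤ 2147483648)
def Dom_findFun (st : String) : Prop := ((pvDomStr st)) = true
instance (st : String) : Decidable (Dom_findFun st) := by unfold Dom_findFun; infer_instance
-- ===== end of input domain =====

-- B: one left-to-right character scan keeping the characters since the last space, stopping at
-- the first open parenthesis, instead of A's token-list split + loop + second split; same result.


-- ===== PORT A =====
-- the for-loop over lines with the find-test and break (word starts empty)
def findFunLoop : List (List Char) → List Char
  | [] => []
  | l :: ls => if 0 ≤ PySem.Chars.find l ['('] then l else findFunLoop ls

def findFun (st : String) : String :=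
  let lines := PySem.Chars.splitOn st.toList [' ']        -- st.split(' ')
  let word := findFunLoop lines
  let words := PySem.Chars.splitOn word ['(']             -- word.split('(')
  let w0 := words.headD []                                 -- words[0] (split is never empty)
  if PySem.Chars.isIn "ClassDef".toList w0 then "" else String.ofList w0

-- ===== PORT B =====
-- the scan: cur = chars since last space; at the first open parenthesis return cur, else none
def findFunScan : List Char → List Char → Option (List Char)
  | _, [] => none
  | cur, c :: rest =>
      if c = '(' then some cur
      else findFunScan (if c = ' ' then [] else cur ++ [c]) rest

def findFun_alt (st : String) : String :=
  match findFunScan [] st.toList with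
  | none => ""
  | some p => if PySem.Chars.isIn "ClassDef".toList p then "" else String.ofList p

-- ===== PRECONDITION & SPEC =====
def Spec_findFun (st : String) (out : String) : Prop := out = findFun_alt st
instance (st : String) (out : String) : Decidable (Spec_findFun st out) := by unfold Spec_findFun; infer_instance

-- ===== CLAIM (what is proved, stated in full; the proofs are below) =====
def Claim_equal_findFun : Prop := ∀ (st : String), Dom_findFun st → Spec_findFun st (findFun st)

-- ===== LEMMAS AND PROOFS =====

-- structural characterisation of s.split(sep) for a one-character separator
def splitF (sep : Char) : List Char → List (List Char)
  | [] => [[]]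
  | c :: cs => if c = sep then [] :: splitF sep cs
               else (c :: (splitF sep cs).headD []) :: (splitF sep cs).tail

theorem splitF_ne_nil (sep : Char) (cs : List Char) : splitF sep cs ≠ [] := by
  cases cs with
  | nil => simp [splitF]
  | cons c cs => simp only [splitF]; split <;> simp

theorem splitOn_go_spec (sep : Char) :
    ∀ (fuel : Nat) (l cur : List Char) (acc : List (List Char)), l.length ≤ fuel →
      PySem.Chars.splitOn.go [sep] fuel l cur acc =
        acc.reverse ++ (cur.reverse ++ (splitF sep l).headD []) :: (splitF sep l).tail := by
  intro fuel
  induction fuel with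
  | zero =>
    intro l cur acc h
    have hl : l = [] := List.eq_nil_of_length_eq_zero (Nat.le_zero.mp h)
    subst hl
    rw [PySem.Chars.splitOn.go.eq_def]
    simp [splitF]
  | succ fuel ih =>
    intro l cur acc h
    cases l with
    | nil =>
      rw [PySem.Chars.splitOn.go.eq_def]
      simp [splitF]
    | cons c rest =>
      rw [PySem.Chars.splitOn.go.eq_def]
      by_cases hc : c = sep
      · subst hc
        have hpre : [c].isPrefixOf (c :: rest) = true := by simp [List.isPrefixOf]
        simp only [hpre, if_true]
        have hdrop : List.drop [c].length (c :: rest) = rest := by simp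
        rw [hdrop, ih rest [] (cur.reverse :: acc) (by simpa using Nat.le_of_succ_le_succ h)]
        rcases hr : splitF c rest with _ | ⟨hh, tt⟩
        · exact absurd hr (splitF_ne_nil c rest)
        · simp [splitF, hr]
      · have hpre : [sep].isPrefixOf (c :: rest) = false := by
          simp [List.isPrefixOf]
          exact fun h' => absurd h'.symm hc
        simp only [hpre, Bool.false_eq_true, if_false]
        rw [ih rest (c :: cur) acc (by simpa using Nat.le_of_succ_le_succ h)]
        rcases hr : splitF sep rest with _ | ⟨hh, tt⟩
        · exact absurd hr (splitF_ne_nil sep rest)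
        · simp [splitF, hr, hc]

theorem splitOn_eq_splitF (sep : Char) (cs : List Char) :
    PySem.Chars.splitOn cs [sep] = splitF sep cs := by
  have h := splitOn_go_spec sep (cs.length + 1) cs [] [] (Nat.le_succ _)
  rw [PySem.Chars.splitOn, h]
  rcases hr : splitF sep cs with _ | ⟨hh, tt⟩
  · exact absurd hr (splitF_ne_nil sep cs)
  · simp

theorem headD_splitF (sep : Char) (cs : List Char) :
    (splitF sep cs).headD [] = cs.takeWhile (· ≠ sep) := by
  induction cs with
  | nil => simp [splitF]
  | cons c cs ih =>
    by_cases hc : c = sep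
    · subst hc; simp [splitF]
    · rcases hr : splitF sep cs with _ | ⟨hh, tt⟩
      · exact absurd hr (splitF_ne_nil sep cs)
      · rw [hr] at ih
        simp only [List.headD_cons] at ih
        simp [splitF, hc, hr, ih]

theorem find_paren_nonneg_iff (l : List Char) :
    (0 ≤ PySem.Chars.find l ['(']) ↔ '(' ∈ l := by
  rw [PySem.Chars.find_nonneg_iff]
  exact List.singleton_infix_iff '(' l

theorem takeWhile_ne_self (acc : List Char) (hacc : '(' ∉ acc) :
    acc.takeWhile (· ≠ '(') = acc :=
  List.takeWhile_eq_self_iff.mpr (by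
    intro x hx
    simp only [decide_eq_true_eq]
    intro h
    exact hacc (by rwa [h] at hx))

-- the core scan/split correspondence
theorem scan_spec :
    ∀ (cs acc : List Char), '(' ∉ acc →
      (findFunScan acc cs).getD [] =
        (findFunLoop ((acc ++ (splitF ' ' cs).headD []) :: (splitF ' ' cs).tail)).takeWhile (· ≠ '(') := by
  intro cs
  induction cs with
  | nil =>
    intro acc hacc
    have hfind : ¬ (0 ≤ PySem.Chars.find acc ['(']) := by
      rw [find_paren_nonneg_iff]; exact hacc
    simp [findFunScan, splitF, findFunLoop, hfind]
  | cons c rest ih =>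
    intro acc hacc
    by_cases hp : c = '('
    · subst hp
      rcases hr : splitF ' ' rest with _ | ⟨hh, tt⟩
      · exact absurd hr (splitF_ne_nil ' ' rest)
      · have hmem : ('(' : Char) ∈ acc ++ '(' :: hh := by simp
        have hfind : 0 ≤ PySem.Chars.find (acc ++ '(' :: hh) ['('] :=
          (find_paren_nonneg_iff _).mpr hmem
        have htk : (acc ++ '(' :: hh).takeWhile (· ≠ '(') = acc := by
          rw [List.takeWhile_append, takeWhile_ne_self acc hacc]
          simp
        simp [findFunScan, splitF, hr, findFunLoop, hfind]
        simpa using htk.symm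
    · by_cases hs : c = ' '
      · subst hs
        have hfind : ¬ (0 ≤ PySem.Chars.find acc ['(']) := by
          rw [find_paren_nonneg_iff]; exact hacc
        rcases hr : splitF ' ' rest with _ | ⟨hh, tt⟩
        · exact absurd hr (splitF_ne_nil ' ' rest)
        · have key := ih [] (by simp)
          rw [hr] at key
          simp only [List.headD_cons, List.tail_cons, List.nil_append] at key
          simpa [findFunScan, splitF, hr, findFunLoop, hp, hfind] using key
      · rcases hr : splitF ' ' rest with _ | ⟨hh, tt⟩
        · exact absurd hr (splitF_ne_nil ' ' rest)
        · have hacc' : '(' ∉ acc ++ [c] := by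
            simp only [List.mem_append, List.mem_singleton, not_or]
            exact ⟨hacc, fun h => hp h.symm⟩
          have key := ih (acc ++ [c]) hacc'
          rw [hr] at key
          simp only [List.headD_cons, List.tail_cons, List.append_assoc,
            List.singleton_append] at key
          simpa [findFunScan, splitF, hr, hp, hs] using key

theorem findFun_eq_alt (st : String) : findFun st = findFun_alt st := by
  have hmain := scan_spec st.toList [] (by simp)
  simp only [List.nil_append] at hmain
  simp only [findFun, findFun_alt, splitOn_eq_splitF, headD_splitF]
  rcases hr : splitF ' ' st.toList with _ | ⟨hh, tt⟩
  · exact absurd hr (splitF_ne_nil ' ' st.toList)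
  · rw [hr] at hmain
    simp only [List.headD_cons, List.tail_cons] at hmain
    cases hscan : findFunScan [] st.toList with
    | none =>
      rw [hscan] at hmain
      simp only [Option.getD_none] at hmain
      rw [← hmain]
      simp [PySem.Chars.isIn]
    | some p =>
      rw [hscan] at hmain
      simp only [Option.getD_some] at hmain
      rw [← hmain]

-- ===== VERDICT (by name: the statement is the Claim_ definition above) =====
theorem findFun_spec : Claim_equal_findFun := by
  intro st _
  unfold Spec_findFun
  exact findFun_eq_alt st
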